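-- pv_equiv track=rewrite | github.com/xmslyz/horae_canonicae | tools/indexer.py | hymns
-- ===== SOURCE A (Python) =====
-- def hymns(elements, i):
--     if elements[i] == "HYMN":
--         joined = ""
--         for j, txt in enumerate(elements[i + 1:]):
--             if txt == "PSALMODIA":
--                 break
--             else:
--                 joined += txt + "\n"
--         return joined
-- ===== SOURCE B (Python) =====
-- def hymns(elements, i):
--     if elements[i] != "HYMN":
--         return None
--     rest = elements[i + 1:]
--     if "PSALMODIA" in rest:
--         rest = rest[:rest.index("PSALMODIA")]
--     return "".join(txt + "\n" for txt in rest)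
-- ===== Notes on version B (the rewrite author's own statement) =====
-- stated objective: idiomatic
-- what changed: B finds the PSALMODIA boundary first (membership test + index), truncates the slice there, and builds the result with one join, instead of A's accumulate-and-break enumerate loop.
import Mathlib
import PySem

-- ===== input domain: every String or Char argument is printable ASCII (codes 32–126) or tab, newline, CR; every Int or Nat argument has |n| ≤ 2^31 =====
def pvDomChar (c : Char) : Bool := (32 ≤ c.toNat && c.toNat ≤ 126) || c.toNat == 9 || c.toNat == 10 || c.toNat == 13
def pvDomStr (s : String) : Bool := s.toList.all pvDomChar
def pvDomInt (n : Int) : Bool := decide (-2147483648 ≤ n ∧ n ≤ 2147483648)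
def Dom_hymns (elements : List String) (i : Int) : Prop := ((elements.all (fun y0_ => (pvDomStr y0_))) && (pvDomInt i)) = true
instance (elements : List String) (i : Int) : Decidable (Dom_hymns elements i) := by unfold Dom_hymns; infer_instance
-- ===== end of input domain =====

-- B finds the PSALMODIA boundary first (index + truncate) and builds the result with one join,
-- instead of A's accumulate-and-break loop; same behaviour, more idiomatic.


-- ===== PORT A =====
-- the 'for j, txt in enumerate(elements[i+1:]) … break' loop with accumulator 'joined'
def hymnsLoop (acc : String) : List String → String
  | [] => acc
  | txt :: rest => if txt = "PSALMODIA" then acc else hymnsLoop (acc ++ (txt ++ "\n")) rest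

def hymns (elements : List String) (i : Int) : Option String :=
  match PySem.List.pyGet? elements i with
  | none => none  -- IndexError, excluded by Pre_
  | some e =>
    if e = "HYMN" then
      some (hymnsLoop "" (PySem.List.slice elements (some (i + 1)) none))
    else none

-- ===== PORT B =====
def hymns_alt (elements : List String) (i : Int) : Option String :=
  match PySem.List.pyGet? elements i with
  | none => none  -- IndexError, excluded by Pre_
  | some e =>
    if e ≠ "HYMN" then none
    else
      let rest := PySem.List.slice elements (some (i + 1)) none
      let rest2 :=
        if "PSALMODIA" ∈ rest then
          match PySem.List.index? rest "PSALMODIA" with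
          | some k => PySem.List.slice rest none (some (k : Int))
          | none => rest  -- unreachable: membership was just checked
        else rest
      some (PySem.Str.join "" (rest2.map (fun txt => txt ++ "\n")))

-- ===== PRECONDITION & SPEC =====
-- A raises IndexError when i is out of range for elements; excluded.
def Pre_hymns (elements : List String) (i : Int) : Prop := PySem.Raise.InRange elements.length i
instance (elements : List String) (i : Int) : Decidable (Pre_hymns elements i) := by unfold Pre_hymns; infer_instance

def pvWitness_hymns : List String × Int := (["HYMN", "a", "PSALMODIA", "b"], 0)

def Spec_hymns (elements : List String) (i : Int) (out : Option String) : Prop := out = hymns_alt elements i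
instance (elements : List String) (i : Int) (out : Option String) : Decidable (Spec_hymns elements i out) := by unfold Spec_hymns; infer_instance

-- ===== CLAIM (what is proved, stated in full; the proofs are below) =====
def Claim_equal_hymns : Prop := ∀ (elements : List String) (i : Int), Dom_hymns elements i → Pre_hymns elements i → Spec_hymns elements i (hymns elements i)

-- ===== LEMMAS AND PROOFS =====

-- B's truncation step, abstracted over the slice, for the loop invariant
def pvCut (l : List String) : List String :=
  if "PSALMODIA" ∈ l then
    match PySem.List.index? l "PSALMODIA" with
    | some k => PySem.List.slice l none (some (k : Int))
    | none => l
  else l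

theorem pvCut_nil : pvCut [] = [] := by simp [pvCut]

theorem pvCut_cons_self (l : List String) : pvCut ("PSALMODIA" :: l) = [] := by
  rw [pvCut, PySem.List.index?_cons_self]
  have h0 : PySem.List.slice ("PSALMODIA" :: l) none (some (0 : Int)) = [] := by
    rw [PySem.List.slice_to _ (by norm_num)]; simp
  simp [h0]

theorem pvCut_cons_ne (t : String) (l : List String) (h : t ≠ "PSALMODIA") :
    pvCut (t :: l) = t :: pvCut l := by
  by_cases hm : "PSALMODIA" ∈ l
  · obtain ⟨k, hk⟩ := Option.isSome_iff_exists.mp ((PySem.List.index?_isSome_iff l _).mpr hm)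
    rw [pvCut, PySem.List.index?_cons_of_ne l h, hk, pvCut, hk]
    simp only [Option.map_some, if_pos (List.mem_cons_of_mem t hm), if_pos hm,
      PySem.List.slice_to_natCast, List.take_succ_cons]
  · have hm' : "PSALMODIA" ∉ t :: l := by
      intro hc; rcases List.mem_cons.mp hc with h' | h'
      · exact h h'.symm
      · exact hm h'
    rw [pvCut, if_neg hm', pvCut, if_neg hm]

theorem join_empty_cons (s : String) (rest : List String) :
    PySem.Str.join "" (s :: rest) = s ++ PySem.Str.join "" rest := by
  apply String.toList_inj.mp
  simp only [PySem.Str.toList_join, List.map_cons, String.toList_append]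
  cases rest with
  | nil => simp [PySem.Chars.join_singleton, PySem.Chars.join_nil]
  | cons q r =>
    rw [List.map_cons, PySem.Chars.join_cons_cons]
    simp

theorem join_empty_nil : PySem.Str.join "" ([] : List String) = "" := by
  apply String.toList_inj.mp
  simp [PySem.Str.toList_join, PySem.Chars.join_nil]

theorem hymnsLoop_eq (l : List String) : ∀ acc : String,
    hymnsLoop acc l = acc ++ PySem.Str.join "" ((pvCut l).map (fun txt => txt ++ "\n")) := by
  induction l with
  | nil => intro acc; simp [hymnsLoop, pvCut_nil, join_empty_nil]
  | cons t rest ih =>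
    intro acc
    by_cases ht : t = "PSALMODIA"
    · subst ht
      simp [hymnsLoop, pvCut_cons_self, join_empty_nil]
    · rw [hymnsLoop, if_neg ht, ih, pvCut_cons_ne t rest ht, List.map_cons, join_empty_cons]
      simp [String.append_assoc]

-- ===== VERDICT (by name: the statement is the Claim_ definition above) =====
theorem hymns_spec : Claim_equal_hymns := by
  intro elements i _ _
  unfold Spec_hymns hymns hymns_alt
  cases hg : PySem.List.pyGet? elements i with
  | none => rfl
  | some e =>
    by_cases he : e = "HYMN"
    · simp only [he, ne_eq, not_true_eq_false, if_false]
      rw [hymnsLoop_eq]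
      show _ = some (PySem.Str.join "" ((pvCut _).map _))
      simp
    · simp [he]
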